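-- pv_equiv track=rewrite | github.com/ktandon91/leetcode | bitwise/bitwise_or.py | helper
-- ===== SOURCE A (Python) =====
-- def helper(a, b, c):
--     ans = 0
--     for i in range(32):
--         bit_c = (c >> i) & 1
--         bit_b = (b >> i) & 1
--         bit_a = (a >> i) & 1
--
--         if (bit_a | bit_b) != bit_c:
--             if bit_c == 0:
--                 if bit_a == 1 and bit_b == 1:
--                     ans=ans+2
--                 else:
--                     ans+=1
--             else:
--                 ans+=1
--     return ans
-- ===== SOURCE B (Python) =====
-- def helper(a, b, c):
--     M = 1 << 32
--     A = a % M
--     B = b % M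
--     C = c % M
--     notc = (M - 1) ^ C
--     return (bin(A & notc).count("1")
--             + bin(B & notc).count("1")
--             + bin(C & ((M - 1) ^ (A | B))).count("1"))
-- ===== Notes on version B (the rewrite author's own statement) =====
-- stated objective: faster
-- what changed: Replaced the 32-iteration per-bit loop with nested if/else by three bit-parallel masked popcounts on the low 32 bits (bits of a and b where c is 0, plus bits where c is 1 but a|b is 0).
import Mathlib
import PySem

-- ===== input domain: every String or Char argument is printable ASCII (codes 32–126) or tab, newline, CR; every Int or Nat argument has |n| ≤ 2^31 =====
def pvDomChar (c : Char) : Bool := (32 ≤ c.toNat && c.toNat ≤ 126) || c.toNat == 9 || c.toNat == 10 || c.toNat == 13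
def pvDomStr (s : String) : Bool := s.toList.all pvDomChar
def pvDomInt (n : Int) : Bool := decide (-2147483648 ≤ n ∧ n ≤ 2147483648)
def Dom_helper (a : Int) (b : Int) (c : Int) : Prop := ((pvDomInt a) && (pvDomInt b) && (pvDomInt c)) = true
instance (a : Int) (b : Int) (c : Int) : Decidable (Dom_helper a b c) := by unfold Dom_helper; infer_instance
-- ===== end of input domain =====

-- B replaces A's 32-iteration per-bit loop (nested if/else per bit) by three bit-parallel masked popcounts of the low 32 bits.


-- ===== PORT A =====
-- literal port of A's loop; Python 'x >> i' is Lean '>>>' (the range elements are nonnegative, so i.toNat is exact)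
def helper (a : Int) (b : Int) (c : Int) : Int :=
  (PySem.List.pyRange 0 32 1).foldl (fun ans i =>
    let bit_c := PySem.Int.band (c >>> i.toNat) 1
    let bit_b := PySem.Int.band (b >>> i.toNat) 1
    let bit_a := PySem.Int.band (a >>> i.toNat) 1
    if PySem.Int.bor bit_a bit_b ≠ bit_c then
      if bit_c = 0 then
        if bit_a = 1 ∧ bit_b = 1 then ans + 2 else ans + 1
      else ans + 1
    else ans) 0

-- ===== PORT B =====
-- literal port of Source B; bin(x).count("1") for x ≥ 0 is exactly PySem.Int.bitCount
def helper_alt (a : Int) (b : Int) (c : Int) : Int :=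
  let M : Int := (1 : Int) <<< (32 : Nat)
  let A := PySem.Int.mod a M
  let B := PySem.Int.mod b M
  let C := PySem.Int.mod c M
  let notc := PySem.Int.bxor (M - 1) C
  (PySem.Int.bitCount (PySem.Int.band A notc) : Int)
    + (PySem.Int.bitCount (PySem.Int.band B notc) : Int)
    + (PySem.Int.bitCount (PySem.Int.band C (PySem.Int.bxor (M - 1) (PySem.Int.bor A B))) : Int)

-- ===== PRECONDITION & SPEC =====
def Spec_helper (a : Int) (b : Int) (c : Int) (out : Int) : Prop := out = helper_alt a b c
instance (a : Int) (b : Int) (c : Int) (out : Int) : Decidable (Spec_helper a b c out) := by unfold Spec_helper; infer_instance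

-- ===== CLAIM (what is proved, stated in full; the proofs are below) =====
def Claim_equal_helper : Prop := ∀ (a : Int) (b : Int) (c : Int), Dom_helper a b c → Spec_helper a b c (helper a b c)

-- ===== LEMMAS AND PROOFS =====

-- bit i of x as A's loop computes it
def pvBit (x : Int) (i : Nat) : Int := PySem.Int.band (x >>> i) 1

-- A's per-iteration contribution
def pvCost (a b c : Int) (i : Nat) : Int :=
  if PySem.Int.bor (pvBit a i) (pvBit b i) ≠ pvBit c i then
    if pvBit c i = 0 then
      if pvBit a i = 1 ∧ pvBit b i = 1 then 2 else 1
    else 1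
  else 0

-- the low-32-bit residue of x
def pvLow (x : Int) : Nat := (x % (2:Int)^32).toNat

lemma pvLow_lt (x : Int) : pvLow x < 2^32 := by
  unfold pvLow
  have h1 : x % (2:Int)^32 < 2^32 := Int.emod_lt_of_pos _ (by norm_num)
  omega

-- A's loop is the sum of the per-bit costs
lemma helper_eq_sum (a b c : Int) :
    helper a b c = ((List.range 32).map (fun j => pvCost a b c j)).sum := by
  have hr : PySem.List.pyRange 0 32 1 = (List.range 32).map (fun j : Nat => (j : Int)) := by decide
  unfold helper
  rw [hr, List.foldl_map]
  refine (List.foldl_ext _ (fun (ans : Int) (j : Nat) => ans + pvCost a b c j) 0 ?_).trans ?_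
  · intro x j _
    simp only [Int.toNat_natCast, Int.shiftRight_natCast_right, pvCost, pvBit]
    split_ifs <;> ring
  · rw [PySem.List.foldl_add]
    ring

-- bit j of x (A's shift-and-mask) equals bit j of the low-32-bit residue, for j < 32
lemma pvBit_eq (x : Int) (j : Nat) (hj : j < 32) :
    pvBit x j = if (pvLow x).testBit j then 1 else 0 := by
  unfold pvBit pvLow
  rw [PySem.Int.band_one, PySem.Int.mod_eq_emod_of_pos (by norm_num : (0:Int) < 2),
    Int.shiftRight_eq_div_pow]
  push_cast
  have h32 : ((2:Int)^32) = 4294967296 := by norm_num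
  simp only [← h32]
  have hr0 : 0 ≤ x % (2:Int)^32 := Int.emod_nonneg x (by norm_num)
  set r := x % (2:Int)^32 with hrdef
  have key : x / ((2:Int)^j) % 2 = r / ((2:Int)^j) % 2 := by
    have hx : (2:Int)^32 * (x / 2^32) + r = x := Int.mul_ediv_add_emod x ((2:Int)^32)
    set q := x / (2:Int)^32 with hq
    have hsplit : (2:Int)^32 = 2^(31-j) * 2 * 2^j := by
      rw [mul_assoc, ← pow_succ', ← pow_add]
      congr 1
      omega
    have hx' : x = r + 2^(31-j) * q * 2 * 2^j := by
      rw [← hx, hsplit]; ring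
    rw [hx', Int.add_mul_ediv_right _ _ (by positivity : ((2:Int)^j) ≠ 0)]
    generalize r / (2:Int)^j = s
    generalize (2:Int)^(31-j) * q = t
    omega
  rw [key]
  have hcast : r / ((2:Int)^j) % 2 = ((r.toNat / 2^j % 2 : Nat) : Int) := by
    conv_lhs => rw [← Int.toNat_of_nonneg hr0]
    push_cast
    rfl
  rw [hcast]
  simp only [Nat.testBit_eq_decide_div_mod_eq, decide_eq_true_eq]
  have h01 : r.toNat / 2^j % 2 = 0 ∨ r.toNat / 2^j % 2 = 1 := by omega
  rcases h01 with h | h <;> simp [h]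

-- popcount of an n < 2^k is the sum of its k low bits
lemma bitCount_eq_sum (k : Nat) : ∀ n : Nat, n < 2^k →
    (PySem.Int.bitCount (n : Int) : Int)
      = ((List.range k).map (fun j => if n.testBit j then (1:Int) else 0)).sum := by
  induction k with
  | zero =>
    intro n hn
    interval_cases n
    simp [PySem.Int.bitCount_zero]
  | succ k ih =>
    intro n hn
    rcases Nat.eq_zero_or_pos n with h0 | hpos
    · subst h0
      simp [PySem.Int.bitCount_zero, Nat.zero_testBit]
    · rw [PySem.Int.bitCount_natCast hpos, List.range_succ_eq_map]
      simp only [List.map_cons, List.map_map, List.sum_cons, Function.comp_def]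
      have hdiv : n / 2 < 2^k := by
        have : n < 2^(k+1) := hn
        omega
      have ihh := ih (n / 2) hdiv
      rw [Nat.cast_add, ihh]
      have hbits : ∀ j, n.testBit (Nat.succ j) = (n / 2).testBit j := by
        intro j; exact Nat.testBit_succ n j
      simp only [hbits]
      have h0bit : (if n.testBit 0 then (1:Int) else 0) = (n % 2 : Nat) := by
        rw [Nat.testBit_zero]
        rcases Nat.mod_two_eq_zero_or_one n with h | h <;> simp [h]
      rw [h0bit]

-- B's three masked popcounts are the same per-bit sum
lemma helper_alt_eq_sum (a b c : Int) :
    helper_alt a b c = ((List.range 32).map (fun j => pvCost a b c j)).sum := by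
  unfold helper_alt
  have hM : ((1:Int) <<< (32:Nat)) = (2:Int)^32 := by decide
  have hMpos : (0:Int) < 2^32 := by norm_num
  have hmod : ∀ x : Int, PySem.Int.mod x ((2:Int)^32) = ((pvLow x : Nat) : Int) := by
    intro x
    rw [PySem.Int.mod_eq_emod_of_pos hMpos, pvLow,
      Int.toNat_of_nonneg (Int.emod_nonneg x (by norm_num))]
  have hmask : ((2:Int)^32 - 1) = (((2^32 - 1 : Nat) : Nat) : Int) := by norm_num
  simp only [hM, hmod, hmask, PySem.Int.band_natCast, PySem.Int.bor_natCast,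
    PySem.Int.bxor_natCast]
  rw [bitCount_eq_sum 32 _ (Nat.lt_of_le_of_lt Nat.and_le_left (pvLow_lt a)),
      bitCount_eq_sum 32 _ (Nat.lt_of_le_of_lt Nat.and_le_left (pvLow_lt b)),
      bitCount_eq_sum 32 _ (Nat.lt_of_le_of_lt Nat.and_le_left (pvLow_lt c)),
      ← PySem.List.sum_map_add_int, ← PySem.List.sum_map_add_int]
  apply congrArg
  apply List.map_congr_left
  intro j hj
  have hj32 : j < 32 := List.mem_range.mp hj
  rw [pvCost, pvBit_eq a j hj32, pvBit_eq b j hj32, pvBit_eq c j hj32]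
  simp only [Nat.testBit_land, Nat.testBit_xor, Nat.testBit_lor,
    Nat.testBit_two_pow_sub_one, hj32, decide_true]
  cases (pvLow a).testBit j <;> cases (pvLow b).testBit j <;> cases (pvLow c).testBit j <;> decide

-- ===== VERDICT (by name: the statement is the Claim_ definition above) =====
theorem helper_spec : Claim_equal_helper := by
  intro a b c _
  unfold Spec_helper
  rw [helper_eq_sum, helper_alt_eq_sum]
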